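-- pv_equiv track=rewrite | github.com/kcoombs/icsmerger | src/icsmerger/exclusions.py | filter_exclusions
-- ===== SOURCE A (Python) =====
-- def filter_exclusions(events, exclusions, output_text):
--     count = 0;
--     filtered_events = set()
--     if exclusions:
--         pass
--         #output_text.insert(tk.END, "Excluded:\n\n")
--     for event in events:
--         if not any(excl.lower() in event[0].lower() for excl in exclusions):
--             filtered_events.add(event)
--         else:
--             if exclusions:
--                 count += 1
--                 #output_text.insert(tk.END, f"  - {event[0]} on {event[1].date()}\n")
--     if count == 0:
--             pass
--             #output_text.insert(tk.END, f"  - None\n")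
--     if exclusions:
--         pass
--         #output_text.insert(tk.END, "\n")
--     return filtered_events
-- ===== SOURCE B (Python) =====
-- def filter_exclusions(events, exclusions, output_text):
--     # Length-grouped pattern-set matcher: hash every lowered exclusion once,
--     # then for each event probe each window of its lowered name (one window
--     # per start position and pattern length) against the set.
--     excl_set = {excl.lower() for excl in exclusions}
--     lengths = {len(excl) for excl in excl_set}
--     kept = set()
--     for event in events:
--         name = event[0].lower()
--         n = len(name)
--         if not any(i + L <= n and name[i:i+L] in excl_set
--                    for i in range(n + 1) for L in lengths):
--             kept.add(event)
--     return kept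
-- ===== Notes on version B (the rewrite author's own statement) =====
-- stated objective: alternative
-- what changed: B replaces A's per-event loop over the exclusion list with per-pattern substring search by a length-grouped pattern-set matcher: all lowered exclusions are hashed into a set once and their distinct lengths collected, then each event's lowered name is scanned by probing each candidate window name[i:i+L] against the set, instead of searching every exclusion inside every name.
import Mathlib
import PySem

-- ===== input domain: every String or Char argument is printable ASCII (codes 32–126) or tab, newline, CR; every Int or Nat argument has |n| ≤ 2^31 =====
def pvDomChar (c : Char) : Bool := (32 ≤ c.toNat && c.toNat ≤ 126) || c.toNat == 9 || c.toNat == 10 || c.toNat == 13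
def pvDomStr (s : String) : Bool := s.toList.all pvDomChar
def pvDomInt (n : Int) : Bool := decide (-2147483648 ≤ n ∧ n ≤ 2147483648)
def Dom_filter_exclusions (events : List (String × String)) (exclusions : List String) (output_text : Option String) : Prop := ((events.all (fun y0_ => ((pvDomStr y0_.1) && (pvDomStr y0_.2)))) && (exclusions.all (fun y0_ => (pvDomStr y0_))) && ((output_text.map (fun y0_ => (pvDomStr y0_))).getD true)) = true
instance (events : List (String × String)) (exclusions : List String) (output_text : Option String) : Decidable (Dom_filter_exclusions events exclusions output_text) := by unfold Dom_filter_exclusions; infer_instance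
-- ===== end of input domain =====

-- B replaces A's per-exclusion substring scan by a length-grouped pattern-set matcher
-- (hash every lowered exclusion once, probe each window of the event name against the
-- set); same return value, a genuinely different matching algorithm ('alternative').

-- ===== PORT A =====
-- 'any(excl.lower() in event[0].lower() for excl in exclusions)'
def pvExcludedA (exclusions : List String) (event : String × String) : Bool :=
  exclusions.any (fun excl => PySem.Str.isIn (PySem.Str.lower excl) (PySem.Str.lower event.1))

def filter_exclusions (events : List (String × String)) (exclusions : List String) (output_text : Option String) : List (String × String) :=
  -- count is threaded exactly as in A (it never influences the returned set)
  (events.foldl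
    (fun (st : Int × PySem.Set (String × String)) event =>
      if !(pvExcludedA exclusions event) then (st.1, PySem.Set.add st.2 event)
      else if exclusions.isEmpty then st else (st.1 + 1, st.2))
    ((0 : Int), PySem.Set.empty)).2

-- ===== PORT B =====
-- 'any(i + L <= n and name[i:i+L] in excl_set for i in range(n + 1) for L in lengths)'
def pvMatchedB (exclSet : PySem.Set String) (lengths : PySem.Set Int) (name : String) : Bool :=
  (PySem.List.pyRange 0 (PySem.Str.len name + 1)).any (fun i =>
    lengths.any (fun L =>
      decide (i + L ≤ PySem.Str.len name) &&
      PySem.Set.contains exclSet (PySem.Str.slice name (some i) (some (i + L)))))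

def filter_exclusions_alt (events : List (String × String)) (exclusions : List String) (output_text : Option String) : List (String × String) :=
  let exclSet := PySem.Set.ofList (exclusions.map PySem.Str.lower)
  let lengths := PySem.Set.ofList (exclSet.map PySem.Str.len)
  events.foldl
    (fun kept event =>
      if !(pvMatchedB exclSet lengths (PySem.Str.lower event.1)) then PySem.Set.add kept event
      else kept)
    PySem.Set.empty

-- ===== PRECONDITION & SPEC =====
def Spec_filter_exclusions (events : List (String × String)) (exclusions : List String) (output_text : Option String) (out : List (String × String)) : Prop := out = filter_exclusions_alt events exclusions output_text
instance (events : List (String × String)) (exclusions : List String) (output_text : Option String) (out : List (String × String)) : Decidable (Spec_filter_exclusions events exclusions output_text out) := by unfold Spec_filter_exclusions; infer_instance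

-- ===== CLAIM (what is proved, stated in full; the proofs are below) =====
def Claim_equal_filter_exclusions : Prop := ∀ (events : List (String × String)) (exclusions : List String) (output_text : Option String), Dom_filter_exclusions events exclusions output_text → Spec_filter_exclusions events exclusions output_text (filter_exclusions events exclusions output_text)

-- ===== LEMMAS AND PROOFS =====

-- Set.contains is list membership
theorem pvContains_iff {α : Type} [BEq α] [LawfulBEq α] (s : PySem.Set α) (x : α) :
    PySem.Set.contains s x = true ↔ x ∈ s := by
  simp [PySem.Set.contains]

-- B's window probe fires exactly when some exclusion occurs in the (lowered) name.
theorem pvMatched_iff (exclusions : List String) (name : String) :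
    pvMatchedB (PySem.Set.ofList (exclusions.map PySem.Str.lower))
        (PySem.Set.ofList ((PySem.Set.ofList (exclusions.map PySem.Str.lower)).map PySem.Str.len))
        name
      = exclusions.any (fun excl => PySem.Str.isIn (PySem.Str.lower excl) name) := by
  rw [Bool.eq_iff_iff]
  simp only [pvMatchedB, List.any_eq_true, Bool.and_eq_true, decide_eq_true_eq,
    PySem.List.mem_pyRange_one, pvContains_iff]
  constructor
  · rintro ⟨i, ⟨hi0, _⟩, L, hL, hguard, hmem⟩
    rw [PySem.Set.mem_ofList] at hmem
    rcases List.mem_map.mp hmem with ⟨excl, hexcl, hsl⟩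
    refine ⟨excl, hexcl, ?_⟩
    -- the window is a prefix of a drop of the name
    have h0L : 0 ≤ i + L := by
      rw [PySem.Set.mem_ofList] at hL
      rcases List.mem_map.mp hL with ⟨e, _, he⟩
      have := PySem.Str.len_eq e
      omega
    have hslice : (PySem.Str.slice name (some i) (some (i + L))).toList
        = List.take ((i + L).toNat - i.toNat) (List.drop i.toNat name.toList) := by
      rw [PySem.Str.toList_slice, PySem.Chars.slice_eq_listSlice,
        PySem.List.slice_toNat _ hi0 h0L]
    rw [PySem.Str.isIn_iff_infix, hsl, hslice]
    exact (List.take_prefix _ _).isInfix.trans (List.drop_suffix _ _).isInfix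
  · rintro ⟨excl, hexcl, hin⟩
    rw [PySem.Str.isIn_iff_infix] at hin
    rcases hin with ⟨u, v, huv⟩
    have hlen : u.length + (PySem.Str.lower excl).toList.length + v.length
        = name.toList.length := by
      rw [← huv]; simp; omega
    refine ⟨(u.length : Int), ⟨by positivity, ?_⟩,
      PySem.Str.len (PySem.Str.lower excl), ?_, ?_, ?_⟩
    · rw [PySem.Str.len_eq]; omega
    · rw [PySem.Set.mem_ofList]
      exact List.mem_map.mpr ⟨PySem.Str.lower excl,
        PySem.Set.mem_ofList _ _ |>.mpr (List.mem_map.mpr ⟨excl, hexcl, rfl⟩), rfl⟩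
    · rw [PySem.Str.len_eq, PySem.Str.len_eq]
      exact_mod_cast by omega
    · rw [PySem.Set.mem_ofList]
      refine List.mem_map.mpr ⟨excl, hexcl, ?_⟩
      apply String.toList_inj.mp
      rw [PySem.Str.toList_slice, PySem.Chars.slice_eq_listSlice, PySem.Str.len_eq,
        PySem.List.slice_natCast_add name.toList u.length (PySem.Str.lower excl).toList.length,
        ← huv]
      rw [show u ++ (PySem.Str.lower excl).toList ++ v
          = u ++ ((PySem.Str.lower excl).toList ++ v) by simp]
      rw [List.drop_left, List.take_left]

-- the second component of A's fold ignores the counter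
theorem snd_foldA (exclusions : List String) :
    ∀ (l : List (String × String)) (c : Int) (s : PySem.Set (String × String)),
      (l.foldl
        (fun (st : Int × PySem.Set (String × String)) event =>
          if !(pvExcludedA exclusions event) then (st.1, PySem.Set.add st.2 event)
          else if exclusions.isEmpty then st else (st.1 + 1, st.2))
        (c, s)).2
      = l.foldl
          (fun (s : PySem.Set (String × String)) event =>
            if !(pvExcludedA exclusions event) then PySem.Set.add s event else s) s := by
  intro l
  induction l with
  | nil => intro c s; rfl
  | cons e l ih =>
    intro c s
    simp only [List.foldl_cons]
    by_cases h : pvExcludedA exclusions e = true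
    · simp only [h, Bool.not_true, Bool.false_eq_true, if_false]
      by_cases he : exclusions.isEmpty = true
      · rw [if_pos he]; exact ih c s
      · rw [if_neg he]; exact ih (c + 1) s
    · rw [Bool.not_eq_true] at h
      simp only [h, Bool.not_false, if_true]
      exact ih c (PySem.Set.add s e)

-- ===== VERDICT (by name: the statement is the Claim_ definition above) =====
theorem filter_exclusions_spec : Claim_equal_filter_exclusions := by
  intro events exclusions output_text _dom
  unfold Spec_filter_exclusions filter_exclusions filter_exclusions_alt
  rw [snd_foldA exclusions events 0 PySem.Set.empty]
  have hfun : (fun (s : PySem.Set (String × String)) event =>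
      if !(pvExcludedA exclusions event) then PySem.Set.add s event else s)
      = (fun (s : PySem.Set (String × String)) event =>
      if !(pvMatchedB (PySem.Set.ofList (exclusions.map PySem.Str.lower))
            (PySem.Set.ofList ((PySem.Set.ofList (exclusions.map PySem.Str.lower)).map PySem.Str.len))
            (PySem.Str.lower event.1)) then PySem.Set.add s event else s) := by
    funext s ev
    rw [pvMatched_iff exclusions (PySem.Str.lower ev.1)]
    rfl
  rw [hfun]
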